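-- pv_equiv track=rewrite | github.com/steffen241/candlebuilder | helper.py | optimizer_permutations_4
-- ===== SOURCE A (Python) =====
-- def optimizer_permutations_4(a,b,c,d):
--     perm = []
--     for i in a:
--         for j in b:
--             for k in c:
--                 for l in d:
--                     perm.append((i,j,k,l))
--     return perm
-- ===== SOURCE B (Python) =====
-- def _product(seqs):
--     # n-ary Cartesian product, recursive: [] -> [[]], else prefix each element
--     # of the head onto every tuple of the product of the tail.
--     if not seqs:
--         return [[]]
--     rest = _product(seqs[1:])
--     return [[x] + t for x in seqs[0] for t in rest]
--
--
-- def optimizer_permutations_4(a, b, c, d):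
--     return [tuple(t) for t in _product([a, b, c, d])]
-- ===== Notes on version B (the rewrite author's own statement) =====
-- stated objective: alternative
-- what changed: Replaced the four hardcoded nested loops with a generic recursive n-ary product helper over a list of sequences, applied to [a,b,c,d].
import Mathlib
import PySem

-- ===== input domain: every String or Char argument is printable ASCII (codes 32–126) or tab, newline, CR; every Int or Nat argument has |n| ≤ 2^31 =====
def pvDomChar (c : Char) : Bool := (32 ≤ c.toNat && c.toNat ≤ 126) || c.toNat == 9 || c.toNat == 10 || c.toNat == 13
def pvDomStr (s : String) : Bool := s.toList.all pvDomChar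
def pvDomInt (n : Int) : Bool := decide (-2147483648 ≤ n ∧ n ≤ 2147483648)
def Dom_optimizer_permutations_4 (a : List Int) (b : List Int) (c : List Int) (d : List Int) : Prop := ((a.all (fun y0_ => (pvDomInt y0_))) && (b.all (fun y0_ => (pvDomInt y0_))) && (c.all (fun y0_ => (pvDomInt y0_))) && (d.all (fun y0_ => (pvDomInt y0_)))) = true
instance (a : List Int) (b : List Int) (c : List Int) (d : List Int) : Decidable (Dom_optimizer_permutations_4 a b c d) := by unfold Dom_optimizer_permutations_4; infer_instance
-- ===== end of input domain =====

-- B replaces the four hardcoded nested loops by a generic recursive n-ary product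
-- over the list [a,b,c,d] (objective: alternative decomposition; same output, same cost).

-- ===== PORT A =====
-- literal port: perm = []; four nested for-loops appending (i,j,k,l)
def optimizer_permutations_4 (a : List Int) (b : List Int) (c : List Int) (d : List Int) : List (Int × Int × Int × Int) :=
  a.foldl (fun perm i =>
    b.foldl (fun perm j =>
      c.foldl (fun perm k =>
        d.foldl (fun perm l => perm ++ [(i, j, k, l)]) perm) perm) perm) []

-- ===== PORT B =====
-- _product(seqs): [] -> [[]], else [[x] + t for x in seqs[0] for t in _product(seqs[1:])]
def pvProduct (seqs : List (List Int)) : List (List Int) :=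
  match seqs with
  | [] => [[]]
  | s :: rest =>
    let r := pvProduct rest
    s.flatMap (fun x => r.map (fun t => x :: t))

-- tuple(t) for a length-4 list (the default branch is unreachable on _product's output)
def pvTup4 (t : List Int) : Int × Int × Int × Int :=
  match t with
  | [i, j, k, l] => (i, j, k, l)
  | _ => (0, 0, 0, 0)

def optimizer_permutations_4_alt (a : List Int) (b : List Int) (c : List Int) (d : List Int) : List (Int × Int × Int × Int) :=
  (pvProduct [a, b, c, d]).map pvTup4

-- ===== PRECONDITION & SPEC =====
def Spec_optimizer_permutations_4 (a : List Int) (b : List Int) (c : List Int) (d : List Int) (out : List (Int × Int × Int × Int)) : Prop := out = optimizer_permutations_4_alt a b c d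
instance (a : List Int) (b : List Int) (c : List Int) (d : List Int) (out : List (Int × Int × Int × Int)) : Decidable (Spec_optimizer_permutations_4 a b c d out) := by unfold Spec_optimizer_permutations_4; infer_instance

-- ===== CLAIM (what is proved, stated in full; the proofs are below) =====
def Claim_equal_optimizer_permutations_4 : Prop := ∀ (a : List Int) (b : List Int) (c : List Int) (d : List Int), Dom_optimizer_permutations_4 a b c d → Spec_optimizer_permutations_4 a b c d (optimizer_permutations_4 a b c d)

-- ===== LEMMAS AND PROOFS =====

-- A's nested append-loops flatten to nested flatMaps
theorem optA_eq_flatMap (a b c d : List Int) :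
    optimizer_permutations_4 a b c d =
      a.flatMap (fun i => b.flatMap (fun j => c.flatMap (fun k => d.map (fun l => (i, j, k, l))))) := by
  unfold optimizer_permutations_4
  simp only [PySem.List.foldl_append_singleton_eq_map, PySem.List.foldl_append_eq_flatMap,
    List.nil_append]

-- B unfolds to the same nested flatMaps
theorem optB_eq_flatMap (a b c d : List Int) :
    optimizer_permutations_4_alt a b c d =
      a.flatMap (fun i => b.flatMap (fun j => c.flatMap (fun k => d.map (fun l => (i, j, k, l))))) := by
  have hsing : ∀ (i j k : Int), d.flatMap (fun l => [(i, j, k, l)]) = d.map (fun l => (i, j, k, l)) := by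
    intro i j k
    induction d with
    | nil => rfl
    | cons x xs ih => simp [ih]
  simp [optimizer_permutations_4_alt, pvProduct, pvTup4, List.map_flatMap, hsing]

-- ===== VERDICT (by name: the statement is the Claim_ definition above) =====
theorem optimizer_permutations_4_spec : Claim_equal_optimizer_permutations_4 := by
  intro a b c d _
  unfold Spec_optimizer_permutations_4
  rw [optA_eq_flatMap, optB_eq_flatMap]
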